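-- pv_equiv track=rewrite | github.com/santunioni/Transformer | transformer/transformers/map_keys.py | __create_big_enough_list
-- ===== SOURCE A (Python) =====
-- from typing import Any, Dict, List, Optional, Set, Tuple, Union
--
-- def __create_big_enough_list(index: int, list_to_write: Optional[List[Any]]):
--     """
--     It gets a list structure in list_to_write and them puts its values in the correct indexes in a list
--     of length given by index. But only if the index is greater than the length list_to_write, otherwise it simply
--     returns list_to_write. The index list is populated with None in the places where its not populated by
--     list_to_write.
--     :param index:
--     :param list_to_write:
--     :return:
--     """
--     list_to_be_overwritten = [None for i in range(0, index + 1)]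
--     if list_to_write is None:
--         return list_to_be_overwritten
--
--     if len(list_to_be_overwritten) > len(list_to_write):
--         for c_index, value in enumerate(list_to_write):
--             list_to_be_overwritten[c_index] = value
--         return list_to_be_overwritten
--
--     return list_to_write
-- ===== SOURCE B (Python) =====
-- from typing import Any, List, Optional
--
--
-- def __create_big_enough_list(index: int, list_to_write: Optional[List[Any]]):
--     result = [] if list_to_write is None else list(list_to_write)
--     while len(result) <= index:
--         result.append(None)
--     return result
-- ===== Notes on version B (the rewrite author's own statement) =====
-- stated objective: alternative
-- what changed: Drops A's allocate-a-full-None-scratch-list-then-overwrite-and-three-way-branch structure entirely: B starts from the given list (or empty) and grows it one None at a time in a single while loop until its length exceeds index.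
import Mathlib
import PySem

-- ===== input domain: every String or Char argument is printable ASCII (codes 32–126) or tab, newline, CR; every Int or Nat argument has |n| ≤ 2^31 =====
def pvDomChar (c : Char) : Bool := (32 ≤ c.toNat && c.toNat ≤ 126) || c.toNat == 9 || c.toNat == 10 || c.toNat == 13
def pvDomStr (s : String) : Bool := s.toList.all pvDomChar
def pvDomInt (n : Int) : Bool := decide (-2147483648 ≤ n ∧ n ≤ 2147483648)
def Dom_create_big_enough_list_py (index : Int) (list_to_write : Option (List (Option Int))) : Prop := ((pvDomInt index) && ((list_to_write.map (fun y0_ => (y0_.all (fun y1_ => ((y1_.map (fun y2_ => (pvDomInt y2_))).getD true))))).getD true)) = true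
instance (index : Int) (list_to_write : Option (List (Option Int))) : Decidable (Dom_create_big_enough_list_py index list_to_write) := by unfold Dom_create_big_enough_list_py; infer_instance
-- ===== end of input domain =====

-- B replaces A's allocate-full-None-scratch-list / overwrite-prefix / three-way branch with a
-- single while loop that grows the given list (or []) by one None until long enough (objective: alternative).
-- A returns list_to_write itself when it is long enough while B returns a copy; the RETURN VALUES are equal.

-- ===== PORT A =====
def create_big_enough_list_py (index : Int) (list_to_write : Option (List (Option Int))) : List (Option Int) :=
  -- list_to_be_overwritten = [None for i in range(0, index + 1)]
  let list_to_be_overwritten : List (Option Int) :=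
    (PySem.List.pyRange 0 (index + 1) 1).map (fun _ => none)
  match list_to_write with
  | none => list_to_be_overwritten
  | some l =>
    if list_to_be_overwritten.length > l.length then
      -- for c_index, value in enumerate(list_to_write): list_to_be_overwritten[c_index] = value
      -- (c_index is always a nonnegative in-range index here, so List.set is exact)
      (PySem.List.enumerate l 0).foldl (fun acc p => acc.set p.1.toNat p.2) list_to_be_overwritten
    else l

-- ===== PORT B =====
-- while len(result) <= index: result.append(None)
def padWhile (index : Int) (result : List (Option Int)) : List (Option Int) :=
  if (result.length : Int) ≤ index then padWhile index (result ++ [none]) else result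
termination_by (index + 1 - (result.length : Int)).toNat
decreasing_by simp; omega

def create_big_enough_list_py_alt (index : Int) (list_to_write : Option (List (Option Int))) : List (Option Int) :=
  padWhile index (match list_to_write with | none => [] | some l => l)

-- ===== PRECONDITION & SPEC =====
def Spec_create_big_enough_list_py (index : Int) (list_to_write : Option (List (Option Int))) (out : List (Option Int)) : Prop := out = create_big_enough_list_py_alt index list_to_write
instance (index : Int) (list_to_write : Option (List (Option Int))) (out : List (Option Int)) : Decidable (Spec_create_big_enough_list_py index list_to_write out) := by unfold Spec_create_big_enough_list_py; infer_instance

-- ===== CLAIM (what is proved, stated in full; the proofs are below) =====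
def Claim_equal_create_big_enough_list_py : Prop := ∀ (index : Int) (list_to_write : Option (List (Option Int))), Dom_create_big_enough_list_py index list_to_write → Spec_create_big_enough_list_py index list_to_write (create_big_enough_list_py index list_to_write)

-- ===== LEMMAS AND PROOFS =====

-- B's while loop pads r with exactly (index + 1 - |r|)⁺ Nones.
lemma padWhile_eq (index : Int) (r : List (Option Int)) :
    padWhile index r = r ++ List.replicate (index + 1 - (r.length : Int)).toNat none := by
  by_cases h : (r.length : Int) ≤ index
  · rw [padWhile, if_pos h, padWhile_eq index (r ++ [none])]
    have hk : (index + 1 - ((r ++ [none]).length : Int)).toNat + 1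
        = (index + 1 - (r.length : Int)).toNat := by simp; omega
    rw [List.append_assoc]
    congr 1
    rw [← hk, List.replicate_succ]
    rfl
  · rw [padWhile, if_neg h]
    have : (index + 1 - (r.length : Int)).toNat = 0 := by omega
    simp [this]
termination_by (index + 1 - (r.length : Int)).toNat
decreasing_by simp; omega

-- A's overwrite loop on a sufficiently long base list writes l over base's prefix from position s.
lemma fold_set_enumerate (l : List (Option Int)) :
    ∀ (s : Nat) (base : List (Option Int)), s + l.length ≤ base.length →
    (PySem.List.enumerate l (s : Int)).foldl (fun acc p => acc.set p.1.toNat p.2) base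
      = base.take s ++ l ++ base.drop (s + l.length) := by
  induction l with
  | nil =>
    intro s base h
    simp [PySem.List.enumerate_nil, List.take_append_drop]
  | cons x xs ih =>
    intro s base h
    rw [PySem.List.enumerate_cons, List.foldl_cons]
    have hs : ((s : Int)).toNat = s := Int.toNat_natCast s
    have hlen : s < base.length := by simp at h; omega
    have hset : base.set s x = base.take s ++ x :: base.drop (s + 1) :=
      List.set_eq_take_cons_drop x hlen
    have := ih (s + 1) (base.set s x) (by simp at h ⊢; omega)
    rw [hs] at *
    have hcast : ((s : Int) + 1) = ((s + 1 : Nat) : Int) := by push_cast; ring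
    rw [hcast, this, hset]
    have htk : (base.take s ++ x :: base.drop (s + 1)).take (s + 1)
        = base.take s ++ [x] := by
      rw [List.take_append]
      simp [List.length_take, Nat.min_eq_left (Nat.le_of_lt hlen)]
    have hdr : (base.take s ++ x :: base.drop (s + 1)).drop (s + 1 + xs.length)
        = base.drop (s + (x :: xs).length) := by
      rw [List.drop_append]
      have h1 : (List.take s base).drop (s + 1 + xs.length) = [] :=
        List.drop_eq_nil_of_le (by simp [List.length_take]; omega)
      have h2 : s + 1 + xs.length - (List.take s base).length = xs.length + 1 := by
        simp [List.length_take]; omega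
      rw [h1, h2]
      simp [List.drop_drop]
      congr 1
      omega
    rw [htk, hdr]
    simp

-- ===== VERDICT (by name: the statement is the Claim_ definition above) =====
theorem create_big_enough_list_py_spec : Claim_equal_create_big_enough_list_py := by
  intro index list_to_write _
  unfold Spec_create_big_enough_list_py create_big_enough_list_py create_big_enough_list_py_alt
  have hbase : (PySem.List.pyRange 0 (index + 1) 1).map (fun _ => (none : Option Int))
      = List.replicate (max (index + 1) 0).toNat none := by
    rw [List.map_const', PySem.List.length_pyRange_one]
    congr 1
    omega
  cases list_to_write with
  | none =>
    rw [padWhile_eq]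
    simpa using hbase.trans (by congr 1)
  | some l =>
    simp only [hbase]
    rw [padWhile_eq]
    by_cases hgt : max (index + 1) 0 > (l.length : Int)
    · have hlen : l.length < (List.replicate (max (index + 1) 0).toNat (none : Option Int)).length := by
        simp; omega
      rw [if_pos (by simpa using hlen)]
      have := fold_set_enumerate l 0 (List.replicate (max (index + 1) 0).toNat none)
        (by simpa using Nat.le_of_lt hlen)
      simp only [Nat.cast_zero] at this
      rw [this]
      simp [List.drop_replicate]
      congr 1
      omega
    · rw [if_neg (by simp; omega)]
      have : (index + 1 - (l.length : Int)).toNat = 0 := by omega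
      simp [this]
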